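-- pv_equiv track=rewrite | github.com/hongjunyan/pytorch-news-recommendation | utils.py | groupping_labels
-- ===== SOURCE A (Python) =====
-- def groupping_labels(labels, preds, group_keys):
--     """Devide labels and preds into several group according to values in group keys.
--     Args:
--         labels (list): ground truth label list.
--         preds (list): prediction score list.
--         group_keys (list): group key list.
--     Returns:
--         list, list, list:
--         - Keys after group.
--         - Labels after group.
--         - Preds after group.
--     """
--
--     all_keys = list(set(group_keys))
--     all_keys.sort()
--     group_labels = {k: [] for k in all_keys}
--     group_preds = {k: [] for k in all_keys}
--
--     for label, p, k in zip(labels, preds, group_keys):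
--         group_labels[k].append(label)
--         group_preds[k].append(p)
--
--     all_labels = []
--     all_preds = []
--     for k in all_keys:
--         all_labels.append(group_labels[k])
--         all_preds.append(group_preds[k])
--
--     return all_keys, all_labels, all_preds
-- ===== SOURCE B (Python) =====
-- def groupping_labels(labels, preds, group_keys):
--     """Group labels/preds by sorted unique keys via one stable sort of the
--     zipped triples and a single run-grouping scan (instead of dict buckets)."""
--     triples = sorted(zip(group_keys, labels, preds), key=lambda t: t[0])
--     all_keys = sorted(set(group_keys))
--     all_labels = []
--     all_preds = []
--     i = 0
--     n = len(triples)
--     for k in all_keys: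
--         ls = []
--         ps = []
--         while i < n and triples[i][0] == k:
--             ls.append(triples[i][1])
--             ps.append(triples[i][2])
--             i += 1
--         all_labels.append(ls)
--         all_preds.append(ps)
--     return all_keys, all_labels, all_preds
-- ===== Notes on version B (the rewrite author's own statement) =====
-- stated objective: alternative
-- what changed: Replaced A's dict-of-buckets (pre-initialized per sorted unique key, filled by appending during the zip pass, then read back) with one stable sort of the zipped (key,label,pred) triples followed by a single two-pointer run-grouping scan over the sorted unique keys.
import Mathlib
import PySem

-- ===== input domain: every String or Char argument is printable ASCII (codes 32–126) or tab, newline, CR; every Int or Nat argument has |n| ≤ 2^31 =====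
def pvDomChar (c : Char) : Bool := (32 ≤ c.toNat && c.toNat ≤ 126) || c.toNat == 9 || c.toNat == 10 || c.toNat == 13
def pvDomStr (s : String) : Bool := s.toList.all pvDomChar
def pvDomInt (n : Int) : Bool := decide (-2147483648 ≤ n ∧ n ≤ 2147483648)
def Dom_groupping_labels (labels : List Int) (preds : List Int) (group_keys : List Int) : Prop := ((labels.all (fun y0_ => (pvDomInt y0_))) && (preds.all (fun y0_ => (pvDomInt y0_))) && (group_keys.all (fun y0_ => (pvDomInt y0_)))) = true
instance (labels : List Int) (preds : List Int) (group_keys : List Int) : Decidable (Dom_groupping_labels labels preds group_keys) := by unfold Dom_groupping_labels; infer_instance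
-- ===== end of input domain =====

-- B replaces A's per-key dict buckets with one stable sort of the zipped (key,label,pred)
-- triples plus a single run-grouping scan over the sorted unique keys (alternative
-- decomposition, similar cost); return values proved equal on all inputs.

-- ===== PORT A =====
def groupping_labels (labels : List Int) (preds : List Int) (group_keys : List Int) : List Int × List (List Int) × List (List Int) :=
  -- all_keys = list(set(group_keys)); all_keys.sort()
  let all_keys := PySem.List.sorted (PySem.Set.ofList group_keys) (fun x => x) false
  -- group_labels = {k: [] for k in all_keys}; group_preds = {k: [] for k in all_keys}
  let gL0 : PySem.Dict Int (List Int) := all_keys.foldl (fun d k => d.insert k []) PySem.Dict.empty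
  let gP0 : PySem.Dict Int (List Int) := all_keys.foldl (fun d k => d.insert k []) PySem.Dict.empty
  -- for label, p, k in zip(labels, preds, group_keys):
  --     group_labels[k].append(label); group_preds[k].append(p)
  -- (each k comes from group_keys so it is a key of both dicts: modify's default [] is never used)
  let st := (labels.zip (preds.zip group_keys)).foldl
      (fun (s : PySem.Dict Int (List Int) × PySem.Dict Int (List Int)) t =>
        (s.1.modify t.2.2 [] (· ++ [t.1]), s.2.modify t.2.2 [] (· ++ [t.2.1]))) (gL0, gP0)
  -- for k in all_keys: all_labels.append(group_labels[k]); all_preds.append(group_preds[k])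
  let all_labels := all_keys.foldl (fun acc k => acc ++ [st.1.getD k []]) []
  let all_preds := all_keys.foldl (fun acc k => acc ++ [st.2.getD k []]) []
  (all_keys, all_labels, all_preds)

-- ===== PORT B =====
-- the inner 'while i < n and triples[i][0] == k' loop: consume the run of key k,
-- returning (its labels, its preds, the remaining triples)
def gl_takeRun (k : Int) : List (Int × Int × Int) → List Int × List Int × List (Int × Int × Int)
  | [] => ([], [], [])
  | t :: ts =>
    if t.1 = k then
      let r := gl_takeRun k ts
      (t.2.1 :: r.1, t.2.2 :: r.2.1, r.2.2)
    else ([], [], t :: ts)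

-- the 'for k in all_keys' loop accumulating all_labels / all_preds
def gl_scan : List Int → List (Int × Int × Int) → List (List Int) × List (List Int)
  | [], _ => ([], [])
  | k :: ks, ts =>
    let r := gl_takeRun k ts
    let s := gl_scan ks r.2.2
    (r.1 :: s.1, r.2.1 :: s.2)

def groupping_labels_alt (labels : List Int) (preds : List Int) (group_keys : List Int) : List Int × List (List Int) × List (List Int) :=
  -- triples = sorted(zip(group_keys, labels, preds), key=lambda t: t[0])
  let triples := PySem.List.sorted (group_keys.zip (labels.zip preds)) (fun t => t.1) false
  -- all_keys = sorted(set(group_keys))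
  let all_keys := PySem.List.sorted (PySem.Set.ofList group_keys) (fun x => x) false
  let s := gl_scan all_keys triples
  (all_keys, s.1, s.2)

-- ===== PRECONDITION & SPEC =====
def Spec_groupping_labels (labels : List Int) (preds : List Int) (group_keys : List Int) (out : List Int × List (List Int) × List (List Int)) : Prop := out = groupping_labels_alt labels preds group_keys
instance (labels : List Int) (preds : List Int) (group_keys : List Int) (out : List Int × List (List Int) × List (List Int)) : Decidable (Spec_groupping_labels labels preds group_keys out) := by unfold Spec_groupping_labels; infer_instance

-- ===== CLAIM (what is proved, stated in full; the proofs are below) =====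
def Claim_equal_groupping_labels : Prop := ∀ (labels : List Int) (preds : List Int) (group_keys : List Int), Dom_groupping_labels labels preds group_keys → Spec_groupping_labels labels preds group_keys (groupping_labels labels preds group_keys)

-- ===== LEMMAS AND PROOFS =====

-- the dict comprehension {k: [] for k in ks}: every lookup with default [] gives []
theorem gl_getD_init (ks : List Int) (d : PySem.Dict Int (List Int)) (c : Int)
    (h : ∀ c', d.getD c' [] = []) :
    (ks.foldl (fun d k => d.insert k ([] : List Int)) d).getD c [] = [] := by
  induction ks generalizing d with
  | nil => exact h c
  | cons k ks ih =>
    simp only [List.foldl_cons]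
    exact ih _ (fun c' => by rw [PySem.Dict.getD_insert]; split <;> simp [h])

-- insertBy (stable insertion step) preserves key-sortedness
theorem gl_insertBy_pairwise {α : Type} (key : α → Int) (x : α) (ys : List α) :
    ys.Pairwise (fun a b => key a ≤ key b) →
    (PySem.List.insertBy (fun a b => decide (key a < key b)) x ys).Pairwise
      (fun a b => key a ≤ key b) := by
  induction ys with
  | nil => intro _; simp [PySem.List.insertBy]
  | cons y ys ih =>
    intro h
    rw [List.pairwise_cons] at h
    obtain ⟨hy, hys⟩ := h
    simp only [PySem.List.insertBy]
    split
    · rename_i hlt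
      refine List.Pairwise.cons ?_ (List.Pairwise.cons hy hys)
      intro b hb
      rcases List.mem_cons.mp hb with rfl | hb
      · exact le_of_lt (by simpa using hlt)
      · exact le_trans (le_of_lt (by simpa using hlt)) (hy b hb)
    · rename_i hnlt
      refine List.Pairwise.cons ?_ (ih hys)
      intro b hb
      rcases (PySem.List.mem_insertBy _ x b ys).mp hb with rfl | hb
      · exact le_of_not_gt (by simpa using hnlt)
      · exact hy b hb

-- filtering one key out of a stable insertion step
theorem gl_insertBy_filter {α : Type} (key : α → Int) (c : Int) (x : α) (ys : List α) :
    ys.Pairwise (fun a b => key a ≤ key b) →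
    (PySem.List.insertBy (fun a b => decide (key a < key b)) x ys).filter
        (fun t => key t == c)
      = ys.filter (fun t => key t == c) ++ (if key x == c then [x] else []) := by
  induction ys with
  | nil =>
    intro _
    simp [PySem.List.insertBy, List.filter_cons]
  | cons y ys ih =>
    intro h
    rw [List.pairwise_cons] at h
    obtain ⟨hy, hys⟩ := h
    simp only [PySem.List.insertBy]
    split
    · rename_i hlt
      have hlt' : key x < key y := by simpa using hlt
      by_cases hc : key x = c
      · -- every element of y :: ys has key ≥ key y > key x = c, so its filter is empty
        have hnil : (y :: ys).filter (fun t => key t == c) = [] := by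
          rw [List.filter_eq_nil_iff]
          intro a ha
          have hya : key y ≤ key a := by
            rcases List.mem_cons.mp ha with rfl | ha
            · exact le_refl _
            · exact hy a ha
          simp only [beq_iff_eq]
          omega
        have h1 : (key x == c) = true := by simpa using hc
        simp [h1, hnil]
      · have h1 : (key x == c) = false := by simpa using hc
        simp [h1]
    · rename_i hnlt
      simp only [List.filter_cons]
      rw [ih hys]
      split <;> simp

-- stable sort commutes with filtering a single key
theorem gl_sorted_filter {α : Type} (key : α → Int) (c : Int) (xs : List α) :
    (PySem.List.sorted xs key false).filter (fun t => key t == c)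
      = xs.filter (fun t => key t == c) := by
  rw [PySem.List.sorted_eq_foldl_insertBy]
  suffices h : ∀ (xs : List α) (acc : List α),
      acc.Pairwise (fun a b => key a ≤ key b) →
      (xs.foldl (fun acc x => PySem.List.insertBy (fun a b => decide (key a < key b)) x acc)
          acc).filter (fun t => key t == c)
        = acc.filter (fun t => key t == c) ++ xs.filter (fun t => key t == c) by
    simpa using h xs [] (List.Pairwise.nil)
  intro xs
  induction xs with
  | nil => intro acc _; simp
  | cons x xs ih =>
    intro acc hacc
    simp only [List.foldl_cons]
    rw [ih _ (gl_insertBy_pairwise key x acc hacc), gl_insertBy_filter key c x acc hacc,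
      List.filter_cons]
    rcases Bool.eq_false_or_eq_true (key x == c) with hpx | hpx <;> simp [hpx]

-- the run-consuming loop on a sorted list whose keys are all ≥ k
theorem gl_takeRun_spec (k : Int) (ts : List (Int × Int × Int)) :
    ts.Pairwise (fun a b => a.1 ≤ b.1) → (∀ t ∈ ts, k ≤ t.1) →
    gl_takeRun k ts
      = ((ts.filter (fun t => t.1 == k)).map (fun t => t.2.1),
         (ts.filter (fun t => t.1 == k)).map (fun t => t.2.2),
         ts.filter (fun t => !(t.1 == k))) := by
  induction ts with
  | nil => intro _ _; simp [gl_takeRun]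
  | cons t ts ih =>
    intro hs hk
    rw [List.pairwise_cons] at hs
    obtain ⟨ht, hts⟩ := hs
    by_cases h : t.1 = k
    · simp only [gl_takeRun, if_pos h]
      rw [ih hts (fun t' ht' => hk t' (List.mem_cons_of_mem _ ht'))]
      simp [h]
    · simp only [gl_takeRun, if_neg h]
      have hklt : k < t.1 := lt_of_le_of_ne (hk t List.mem_cons_self) (fun e => h e.symm)
      have hgt : ∀ a ∈ t :: ts, k < a.1 := by
        intro a ha
        rcases List.mem_cons.mp ha with rfl | ha
        · exact hklt
        · exact lt_of_lt_of_le hklt (ht a ha)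
      have h1 : (t :: ts).filter (fun t => t.1 == k) = [] := by
        rw [List.filter_eq_nil_iff]
        intro a ha
        have := hgt a ha
        simp only [beq_iff_eq]
        omega
      have h2 : (t :: ts).filter (fun t => !(t.1 == k)) = t :: ts := by
        rw [List.filter_eq_self]
        intro a ha
        have := hgt a ha
        simp only [Bool.not_eq_eq_eq_not, Bool.not_true, beq_eq_false_iff_ne]
        omega
      rw [h1, h2]
      simp

-- the outer loop over strictly increasing keys covering every triple's key
theorem gl_scan_spec (ks : List Int) : ∀ (ts : List (Int × Int × Int)),
    ts.Pairwise (fun a b => a.1 ≤ b.1) → ks.Pairwise (· < ·) →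
    (∀ t ∈ ts, t.1 ∈ ks) →
    gl_scan ks ts
      = (ks.map (fun c => (ts.filter (fun t => t.1 == c)).map (fun t => t.2.1)),
         ks.map (fun c => (ts.filter (fun t => t.1 == c)).map (fun t => t.2.2))) := by
  induction ks with
  | nil =>
    intro ts _ _ hcov
    have hts : ts = [] := by
      cases ts with
      | nil => rfl
      | cons t ts => exact absurd (hcov t List.mem_cons_self) List.not_mem_nil
    subst hts; simp [gl_scan]
  | cons k ks ih =>
    intro ts hs hks hcov
    rw [List.pairwise_cons] at hks
    obtain ⟨hkk, hks⟩ := hks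
    have hmin : ∀ t ∈ ts, k ≤ t.1 := by
      intro t ht
      rcases List.mem_cons.mp (hcov t ht) with h | h
      · omega
      · exact le_of_lt (hkk _ h)
    simp only [gl_scan]
    rw [gl_takeRun_spec k ts hs hmin]
    have hrest_sorted : (ts.filter (fun t => !(t.1 == k))).Pairwise (fun a b => a.1 ≤ b.1) :=
      List.Pairwise.sublist List.filter_sublist hs
    have hrest_cov : ∀ t ∈ ts.filter (fun t => !(t.1 == k)), t.1 ∈ ks := by
      intro t ht
      rw [List.mem_filter] at ht
      rcases List.mem_cons.mp (hcov t ht.1) with h | h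
      · exfalso; have := ht.2; simp at this; omega
      · exact h
    rw [ih _ hrest_sorted hks hrest_cov]
    have hfix : ∀ (proj : Int × Int × Int → Int), ks.map
        (fun c => ((ts.filter (fun t => !(t.1 == k))).filter (fun t => t.1 == c)).map proj)
      = ks.map (fun c => (ts.filter (fun t => t.1 == c)).map proj) := by
      intro proj
      apply List.map_congr_left
      intro c hc
      have hck : k < c := hkk c hc
      congr 1
      rw [List.filter_filter]
      apply List.filter_congr
      intro t _
      by_cases h : t.1 = c
      · subst h
        have hne : (t.1 == k) = false := by simp only [beq_eq_false_iff_ne]; omega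
        simp [hne]
      · simp [h]
    rw [hfix (fun t => t.2.1), hfix (fun t => t.2.2)]
    simp

-- zip(labels, preds, group_keys) rearranged to zip(group_keys, labels, preds)
theorem gl_zip3_swap (as bs cs : List Int) :
    (as.zip (bs.zip cs)).map (fun t => (t.2.2, t.1, t.2.1)) = cs.zip (as.zip bs) := by
  induction as generalizing bs cs with
  | nil => simp
  | cons a as ih =>
    cases bs with
    | nil => simp
    | cons b bs =>
      cases cs with
      | nil => simp
      | cons c cs => simp [List.zip_cons_cons, ih]

-- the filled dict of A, looked up at c, is the c-keyed bucket of the zip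
theorem gl_dict_loop (trips : List (Int × Int × Int)) (d : PySem.Dict Int (List Int))
    (sel : Int × Int × Int → Int) (c : Int) :
    (trips.foldl (fun d t => d.modify t.2.2 [] (· ++ [sel t])) d).getD c []
      = d.getD c [] ++ (trips.filter (fun t => t.2.2 == c)).map sel := by
  have h : trips.foldl (fun d t => d.modify t.2.2 [] (· ++ [sel t])) d
      = (trips.map (fun t => (t.2.2, sel t))).foldl
          (fun d p => d.modify p.1 [] (· ++ [p.2])) d := by
    rw [List.foldl_map]
  rw [h, PySem.Dict.getD_foldl_modify_append, List.filter_map, List.map_map]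
  rfl

-- the two ports agree on every input
theorem gl_main (labels preds group_keys : List Int) :
    groupping_labels labels preds group_keys = groupping_labels_alt labels preds group_keys := by
  unfold groupping_labels groupping_labels_alt
  simp only []
  set K := PySem.List.sorted (PySem.Set.ofList group_keys) (fun x => x) false with hK
  set T := group_keys.zip (labels.zip preds) with hT
  -- A's two-dict loop splits into two independent dict loops
  rw [PySem.List.foldl_prod_mk
      (f := fun d (t : Int × Int × Int) => PySem.Dict.modify d t.2.2 [] (· ++ [t.1]))
      (g := fun d (t : Int × Int × Int) => PySem.Dict.modify d t.2.2 [] (· ++ [t.2.1]))]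
  simp only [PySem.List.foldl_append_singleton_eq_map, List.nil_append]
  -- A's buckets, read per key
  have hA : ∀ (sel : Int × Int × Int → Int) (c : Int),
      ((labels.zip (preds.zip group_keys)).foldl
          (fun d t => d.modify t.2.2 [] (· ++ [sel t]))
          (K.foldl (fun d k => d.insert k []) PySem.Dict.empty)).getD c []
        = (T.filter (fun t => t.1 == c)).map (fun t => sel (t.2.1, t.2.2, t.1)) := by
    intro sel c
    rw [gl_dict_loop, gl_getD_init _ _ _ (fun c' => by simp [PySem.Dict.getD_empty]),
      List.nil_append]
    have := gl_zip3_swap labels preds group_keys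
    rw [hT, ← this, List.filter_map, List.map_map]
    rfl
  simp only [hA]
  -- B's scan, characterised
  have hTs : (PySem.List.sorted T (fun t => t.1) false).Pairwise (fun a b => a.1 ≤ b.1) :=
    PySem.List.sorted_pairwise T (fun t => t.1)
  have hKp : K.Pairwise (· < ·) := PySem.List.sorted_ofList_pairwise_lt group_keys
  have hcov : ∀ t ∈ PySem.List.sorted T (fun t => t.1) false, t.1 ∈ K := by
    intro t ht
    rw [PySem.List.mem_sorted] at ht
    rw [hK, PySem.List.mem_sorted, PySem.Set.mem_ofList]
    rcases t with ⟨k, lp⟩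
    exact (List.of_mem_zip ht).1
  rw [gl_scan_spec K _ hTs hKp hcov]
  refine congrArg (Prod.mk K) ?_
  refine congrArg₂ Prod.mk ?_ ?_ <;>
    · apply List.map_congr_left
      intro c _
      rw [gl_sorted_filter (fun t => t.1) c T]

-- ===== VERDICT (by name: the statement is the Claim_ definition above) =====
theorem groupping_labels_spec : Claim_equal_groupping_labels := by
  intro labels preds group_keys _
  unfold Spec_groupping_labels
  exact gl_main labels preds group_keys
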